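-- pv_equiv track=rewrite | github.com/wonjw3638/SWEA-Python-Study | Day09/1220_Magnetic/1220_유한별.py | cnt_NS
-- ===== SOURCE A (Python) =====
-- def cnt_NS(table, n) :
--     # NS는 현재 극 상태
--     NS = 1
--     cnt = 0
--     for i in range(n) :
--         if NS == 1 and table[i] == 2 :
--             NS = 2
--             cnt += 1
--         if NS == 2 and table[i] == 1 :
--             NS = 1
--     return cnt
-- ===== SOURCE B (Python) =====
-- def cnt_NS(table, n):
--     vals = [table[i] for i in range(n)]
--     filt = [v for v in vals if v == 1 or v == 2]
--     collapsed = [v for k, v in enumerate(filt) if k == 0 or filt[k - 1] != v]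
--     return collapsed.count(2)
-- ===== Notes on version B (the rewrite author's own statement) =====
-- stated objective: alternative
-- what changed: A's imperative two-if polarity state machine is replaced by a declarative pipeline: gather the first n values, filter to those equal to 1 or 2, drop consecutive duplicates via an enumerate comprehension, and count the remaining 2s.
import Mathlib
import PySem

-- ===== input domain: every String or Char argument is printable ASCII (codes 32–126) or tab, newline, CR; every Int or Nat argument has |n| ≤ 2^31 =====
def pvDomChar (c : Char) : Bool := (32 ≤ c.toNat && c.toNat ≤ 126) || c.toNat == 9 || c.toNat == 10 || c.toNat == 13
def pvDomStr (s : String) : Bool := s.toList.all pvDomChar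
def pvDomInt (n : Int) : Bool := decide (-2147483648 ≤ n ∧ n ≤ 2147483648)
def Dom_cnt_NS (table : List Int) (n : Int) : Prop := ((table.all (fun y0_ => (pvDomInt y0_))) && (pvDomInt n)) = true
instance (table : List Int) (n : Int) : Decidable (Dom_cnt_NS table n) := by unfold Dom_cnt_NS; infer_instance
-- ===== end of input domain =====

-- B replaces A's two-if state machine by a declarative pipeline (gather, filter to {1,2},
-- drop consecutive duplicates, count the 2s): same value, different decomposition (objective: simpler).

-- ===== PORT A =====
def cnt_NS (table : List Int) (n : Int) : Int :=
  -- state is (NS, cnt); table[i] is valid under Pre_ (0 ≤ i < n ≤ len table)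
  let r := (PySem.List.pyRange 0 n 1).foldl
    (fun (s : Int × Int) i =>
      let v := PySem.List.pyGetD table i 0
      let s1 := if s.1 == 1 && v == 2 then ((2 : Int), s.2 + 1) else s
      if s1.1 == 2 && v == 1 then ((1 : Int), s1.2) else s1)
    (1, 0)
  r.2

-- ===== PORT B =====
def cnt_NS_alt (table : List Int) (n : Int) : Int :=
  let vals := (PySem.List.pyRange 0 n 1).map (fun i => PySem.List.pyGetD table i 0)
  let filt := vals.filter (fun v => v == 1 || v == 2)
  let collapsed := ((PySem.List.enumerate filt 0).filter
      (fun kv => kv.1 == 0 || !(PySem.List.pyGetD filt (kv.1 - 1) 0 == kv.2))).map Prod.snd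
  ((collapsed.count 2 : Nat) : Int)

-- ===== PRECONDITION & SPEC =====
-- Pre_ excludes exactly the inputs where A raises IndexError: n exceeding len(table).
def Pre_cnt_NS (table : List Int) (n : Int) : Prop := n ≤ (table.length : Int)
instance (table : List Int) (n : Int) : Decidable (Pre_cnt_NS table n) := by unfold Pre_cnt_NS; infer_instance

def pvWitness_cnt_NS : List Int × Int := ([2, 1, 2, 0, 2, 3, 2], 7)

def Spec_cnt_NS (table : List Int) (n : Int) (out : Int) : Prop := out = cnt_NS_alt table n
instance (table : List Int) (n : Int) (out : Int) : Decidable (Spec_cnt_NS table n out) := by unfold Spec_cnt_NS; infer_instance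

-- ===== CLAIM (what is proved, stated in full; the proofs are below) =====
def Claim_equal_cnt_NS : Prop := ∀ (table : List Int) (n : Int), Dom_cnt_NS table n → Pre_cnt_NS table n → Spec_cnt_NS table n (cnt_NS table n)

-- ===== LEMMAS AND PROOFS =====

-- destutter with an explicit "previous value" context: keeps y iff it differs from its predecessor
def pvDstr (c : Int) (l : List Int) : List Int :=
  match l with
  | [] => []
  | y :: ys => (if c == y then ([] : List Int) else [y]) ++ pvDstr y ys

-- A's loop step on an already-fetched value
def pvStep (s : Int × Int) (v : Int) : Int × Int :=
  let s1 := if s.1 == 1 && v == 2 then ((2 : Int), s.2 + 1) else s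
  if s1.1 == 2 && v == 1 then ((1 : Int), s1.2) else s1

lemma pvGetD_drop (L : List Int) (k : Nat) (y : Int) (ys : List Int)
    (h : L.drop k = y :: ys) : L.getD k 0 = y := by
  have h0 : L[k]? = some y := by
    have h2 := congrArg (fun l : List Int => l[0]?) h
    simp only [List.getElem?_drop] at h2
    simpa using h2
  simp [List.getD_eq_getElem?_getD, h0]

-- the enumerate/filter comprehension on the tail equals pvDstr with the predecessor as context
lemma pvTail_eq (ys : List Int) : ∀ (L : List Int) (k : Nat), L.drop k = ys → 1 ≤ k →
    ((PySem.List.enumerate ys (k : Int)).filter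
      (fun kv => kv.1 == 0 || !(PySem.List.pyGetD L (kv.1 - 1) 0 == kv.2))).map Prod.snd
      = pvDstr (L.getD (k - 1) 0) ys := by
  induction ys with
  | nil => intro L k _ _; simp [PySem.List.enumerate_nil, pvDstr]
  | cons y ys ih =>
    intro L k hdrop hk
    have hky : L.getD k 0 = y := pvGetD_drop L k y ys hdrop
    have hdrop' : L.drop (k + 1) = ys := by
      have h2 := congrArg (List.drop 1) hdrop
      simpa [List.drop_drop, Nat.add_comm] using h2
    have hcast : ((k : Int)) - 1 = ((k - 1 : Nat) : Int) := by omega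
    have hk0 : ((k : Int) == 0) = false := by simp; omega
    have htail := ih L (k + 1) hdrop' (by omega)
    have hcast2 : ((k : Int)) + 1 = ((k + 1 : Nat) : Int) := by push_cast; ring
    simp only [PySem.List.enumerate_cons, List.filter_cons, pvDstr]
    rw [hcast2, apply_ite (List.map Prod.snd), List.map_cons]
    have htail' := htail
    rw [show k + 1 - 1 = k from rfl, hky] at htail'
    rw [htail', hcast, PySem.List.pyGetD_natCast, hk0]
    by_cases hpy : L[k - 1]?.getD 0 = y
    · simp [hpy]
    · simp [hpy]

-- the whole comprehension on a nonempty list: head kept, tail destuttered from the head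
lemma pvE_eq (L : List Int) :
    ((PySem.List.enumerate L 0).filter
      (fun kv => kv.1 == 0 || !(PySem.List.pyGetD L (kv.1 - 1) 0 == kv.2))).map Prod.snd
      = match L with | [] => [] | x :: xs => x :: pvDstr x xs := by
  match L with
  | [] => simp [PySem.List.enumerate_nil]
  | x :: xs =>
    have htail := pvTail_eq xs (x :: xs) 1 (by simp) (by omega)
    simp only [List.getD_cons_zero, Nat.sub_self] at htail
    simp only [PySem.List.enumerate_cons, List.filter_cons, apply_ite (List.map Prod.snd),
      List.map_cons]
    rw [show ((0 : Int) + 1) = ((1 : Nat) : Int) by norm_num, htail]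
    simp

-- evaluation of A's step on the relevant states
lemma pvStep_11 (c : Int) : pvStep (1, c) 1 = (1, c) := by simp [pvStep]
lemma pvStep_12 (c : Int) : pvStep (1, c) 2 = (2, c + 1) := by simp [pvStep]
lemma pvStep_21 (c : Int) : pvStep (2, c) 1 = (1, c) := by simp [pvStep]
lemma pvStep_22 (c : Int) : pvStep (2, c) 2 = (2, c) := by simp [pvStep]
lemma pvStep_1o (c v : Int) (h2 : v ≠ 2) : pvStep (1, c) v = (1, c) := by
  simp [pvStep, h2]
lemma pvStep_2o (c v : Int) (h1 : v ≠ 1) : pvStep (2, c) v = (2, c) := by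
  simp [pvStep, h1]

-- A's loop from state s ∈ {1,2} counts the 2-runs of the filtered suffix, seen from context s
lemma pvLoop_eq (ls : List Int) : ∀ (s cnt : Int), s = 1 ∨ s = 2 →
    (ls.foldl pvStep (s, cnt)).2
      = cnt + (((pvDstr s (ls.filter (fun v => v == 1 || v == 2))).count 2 : Nat) : Int) := by
  induction ls with
  | nil => intro s cnt _; simp [pvDstr]
  | cons v ls ih =>
    intro s cnt hs
    by_cases h1 : v = 1
    · subst h1
      rcases hs with h | h <;> subst h
      · rw [List.foldl_cons, pvStep_11, ih 1 cnt (Or.inl rfl)]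
        simp [pvDstr]
      · rw [List.foldl_cons, pvStep_21, ih 1 cnt (Or.inl rfl)]
        simp [pvDstr]
    · by_cases h2 : v = 2
      · subst h2
        rcases hs with h | h <;> subst h
        · rw [List.foldl_cons, pvStep_12, ih 2 (cnt + 1) (Or.inr rfl)]
          simp [pvDstr]
          ring
        · rw [List.foldl_cons, pvStep_22, ih 2 cnt (Or.inr rfl)]
          simp [pvDstr]
      · rcases hs with h | h <;> subst h
        · rw [List.foldl_cons, pvStep_1o cnt v h2, ih 1 cnt (Or.inl rfl)]
          simp [h1, h2]
        · rw [List.foldl_cons, pvStep_2o cnt v h1, ih 2 cnt (Or.inr rfl)]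
          simp [h1, h2]

-- ===== VERDICT (by name: the statement is the Claim_ definition above) =====
theorem cnt_NS_spec : Claim_equal_cnt_NS := by
  intro table n _ _
  unfold Spec_cnt_NS cnt_NS cnt_NS_alt
  dsimp only
  rw [pvE_eq]
  have hfold : (PySem.List.pyRange 0 n 1).foldl
      (fun (s : Int × Int) i =>
        let v := PySem.List.pyGetD table i 0
        let s1 := if s.1 == 1 && v == 2 then ((2 : Int), s.2 + 1) else s
        if s1.1 == 2 && v == 1 then ((1 : Int), s1.2) else s1) (1, 0)
      = ((PySem.List.pyRange 0 n 1).map (fun i => PySem.List.pyGetD table i 0)).foldl pvStep (1, 0) := by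
    rw [List.foldl_map]
    rfl
  rw [hfold, pvLoop_eq _ 1 0 (Or.inl rfl)]
  set fl := ((PySem.List.pyRange 0 n 1).map (fun i => PySem.List.pyGetD table i 0)).filter
      (fun v => v == 1 || v == 2) with hfl
  match hEq : fl with
  | [] => simp [pvDstr]
  | x :: xs =>
    have hx : x = 1 ∨ x = 2 := by
      have hmem : x ∈ fl := by simp [hEq]
      have hpx := List.of_mem_filter (p := fun v => v == 1 || v == 2) hmem
      simp at hpx
      tauto
    rcases hx with h | h <;> subst h
    · simp [pvDstr]
    · simp [pvDstr]
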